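-- pv_equiv track=rewrite | github.com/aurora0110/fintech | utils/tmp/run_b2_trendline_exit_with_n_experiment.py | max_consecutive_failures
-- ===== SOURCE A (Python) =====
-- from typing import Dict, List, Optional, Tuple
--
-- def max_consecutive_failures(flags: List[bool]) -> int:
--     best = 0
--     cur = 0
--     for flag in flags:
--         if flag:
--             cur = 0
--         else:
--             cur += 1
--             best = max(best, cur)
--     return best
-- ===== SOURCE B (Python) =====
-- def max_consecutive_failures(flags):
--     # group-then-reduce: partition into maximal runs of equal values,
--     # then take the longest run among the False groups (0 if none)
--     runs = []
--     for flag in flags: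
--         if runs and runs[-1][0] == flag:
--             runs[-1] = (flag, runs[-1][1] + 1)
--         else:
--             runs.append((flag, 1))
--     return max((n for k, n in runs if not k), default=0)
-- ===== Notes on version B (the rewrite author's own statement) =====
-- stated objective: alternative
-- what changed: Replaces the running counter with in-loop max by a group-then-reduce pass: the list is first split into maximal runs of equal consecutive values, then the answer is the maximum length over the False runs (0 if none).
import Mathlib
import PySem

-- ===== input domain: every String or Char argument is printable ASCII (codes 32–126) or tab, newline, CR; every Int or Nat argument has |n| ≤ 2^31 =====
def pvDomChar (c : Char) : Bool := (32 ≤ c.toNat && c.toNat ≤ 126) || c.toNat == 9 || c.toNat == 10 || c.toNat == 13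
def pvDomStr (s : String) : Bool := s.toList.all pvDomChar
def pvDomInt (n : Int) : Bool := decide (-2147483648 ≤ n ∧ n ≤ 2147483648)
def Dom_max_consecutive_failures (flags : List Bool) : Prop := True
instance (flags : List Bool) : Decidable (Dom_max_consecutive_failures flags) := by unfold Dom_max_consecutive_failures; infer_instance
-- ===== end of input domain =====

-- B replaces A's running counter with in-loop max by a group-then-reduce pass (alternative decomposition, same cost).

-- ===== PORT A =====
def max_consecutive_failures (flags : List Bool) : Int :=
  (flags.foldl (fun (s : Int × Int) flag =>
    if flag then (s.1, 0) else (s.1 ⊔ (s.2 + 1), s.2 + 1)) (0, 0)).1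

-- ===== PORT B =====
-- one iteration of B's grouping loop: increment the last run or start a new one
def pushFlag (runs : List (Bool × Nat)) (flag : Bool) : List (Bool × Nat) :=
  match runs.getLast? with
  | some (b, n) => if b = flag then runs.dropLast ++ [(b, n + 1)] else runs ++ [(flag, 1)]
  | none => [(flag, 1)]

-- B's final reduce: max over the lengths of the False runs, default 0
def falseRunsMax (runs : List (Bool × Nat)) : Int :=
  (runs.filterMap (fun p => if p.1 then none else some ((p.2 : Int)))).foldl max 0

def max_consecutive_failures_alt (flags : List Bool) : Int :=
  falseRunsMax (flags.foldl pushFlag [])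

-- ===== PRECONDITION & SPEC =====
def Spec_max_consecutive_failures (flags : List Bool) (out : Int) : Prop := out = max_consecutive_failures_alt flags
instance (flags : List Bool) (out : Int) : Decidable (Spec_max_consecutive_failures flags out) := by unfold Spec_max_consecutive_failures; infer_instance

-- ===== CLAIM (what is proved, stated in full; the proofs are below) =====
def Claim_equal_max_consecutive_failures : Prop := ∀ (flags : List Bool), Dom_max_consecutive_failures flags → Spec_max_consecutive_failures flags (max_consecutive_failures flags)

-- ===== LEMMAS AND PROOFS =====

theorem falseRunsMax_concat (rs : List (Bool × Nat)) (p : Bool × Nat) :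
    falseRunsMax (rs ++ [p]) =
      if p.1 then falseRunsMax rs else falseRunsMax rs ⊔ (p.2 : Int) := by
  simp [falseRunsMax, List.filterMap_append]
  split <;> rename_i h <;> simp [h]

theorem pushFlag_concat (ys : List (Bool × Nat)) (b : Bool) (n : Nat) (flag : Bool) :
    pushFlag (ys ++ [(b, n)]) flag =
      if b = flag then ys ++ [(b, n + 1)] else (ys ++ [(b, n)]) ++ [(flag, 1)] := by
  simp [pushFlag]

-- relation between A's `cur` and B's run accumulator: `cur` is the length of the
-- trailing False run (0 if the accumulator is empty or ends in a True run)
def CurOK (acc : List (Bool × Nat)) (c : Int) : Prop :=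
  match acc.getLast? with
  | some (false, n) => c = (n : Int)
  | _ => c = 0

theorem CurOK_concat_true (ys : List (Bool × Nat)) (m : Nat) (c : Int) :
    CurOK (ys ++ [(true, m)]) c ↔ c = 0 := by
  unfold CurOK; rw [List.getLast?_concat]

theorem CurOK_concat_false (ys : List (Bool × Nat)) (m : Nat) (c : Int) :
    CurOK (ys ++ [(false, m)]) c ↔ c = (m : Int) := by
  unfold CurOK; rw [List.getLast?_concat]

theorem step_true (acc : List (Bool × Nat)) (b c : Int)
    (hb : b = falseRunsMax acc) (hc : CurOK acc c) :
    falseRunsMax (pushFlag acc true) = b ∧ CurOK (pushFlag acc true) 0 := by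
  rcases List.eq_nil_or_concat acc with h | ⟨ys, ⟨bb, m⟩, h⟩ <;> subst h <;>
    (try simp only [List.concat_eq_append] at hb hc ⊢)
  · exact ⟨by simp [pushFlag, falseRunsMax, hb], by simp [pushFlag, CurOK]⟩
  · cases bb
    · rw [pushFlag_concat, if_neg (by simp : ¬ (false = true))]
      refine ⟨?_, by rw [CurOK_concat_true]⟩
      rw [falseRunsMax_concat, hb]; simp
    · rw [pushFlag_concat, if_pos rfl]
      refine ⟨?_, by rw [CurOK_concat_true]⟩
      rw [falseRunsMax_concat] at hb
      rw [falseRunsMax_concat]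
      simpa using hb.symm

theorem step_false (acc : List (Bool × Nat)) (b c : Int)
    (hb : b = falseRunsMax acc) (hc : CurOK acc c) :
    falseRunsMax (pushFlag acc false) = b ⊔ (c + 1) ∧ CurOK (pushFlag acc false) (c + 1) := by
  rcases List.eq_nil_or_concat acc with h | ⟨ys, ⟨bb, m⟩, h⟩ <;> subst h <;>
    (try simp only [List.concat_eq_append] at hb hc ⊢)
  · have hc0 : c = 0 := hc
    subst hc0
    exact ⟨by simp [pushFlag, falseRunsMax, hb], by simp [pushFlag, CurOK]⟩
  · cases bb
    · rw [CurOK_concat_false] at hc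
      subst hc
      rw [pushFlag_concat, if_pos rfl]
      constructor
      · rw [falseRunsMax_concat] at hb
        rw [falseRunsMax_concat, hb]
        simp only [Bool.false_eq_true, if_false]
        push_cast
        omega
      · rw [CurOK_concat_false]; push_cast; ring
    · rw [CurOK_concat_true] at hc
      subst hc
      rw [pushFlag_concat, if_neg (by simp : ¬ (true = false))]
      constructor
      · rw [falseRunsMax_concat, falseRunsMax_concat] at *
        simp only [Bool.false_eq_true, if_false] at *
        rw [hb]; norm_num
      · rw [CurOK_concat_false]; norm_num

theorem main_invariant (l : List Bool) :
    ∀ (acc : List (Bool × Nat)) (b c : Int), b = falseRunsMax acc → CurOK acc c →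
      (l.foldl (fun (s : Int × Int) flag =>
        if flag then (s.1, 0) else (s.1 ⊔ (s.2 + 1), s.2 + 1)) (b, c)).1 =
      falseRunsMax (l.foldl pushFlag acc) := by
  induction l with
  | nil => intro acc b c hb _; simpa using hb
  | cons x xs ih =>
    intro acc b c hb hc
    cases x
    · obtain ⟨h1, h2⟩ := step_false acc b c hb hc
      simpa using ih (pushFlag acc false) (b ⊔ (c + 1)) (c + 1) h1.symm h2
    · obtain ⟨h1, h2⟩ := step_true acc b c hb hc
      simpa using ih (pushFlag acc true) b 0 h1.symm h2

-- ===== VERDICT (by name: the statement is the Claim_ definition above) =====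
theorem max_consecutive_failures_spec : Claim_equal_max_consecutive_failures := by
  intro flags _
  show max_consecutive_failures flags = max_consecutive_failures_alt flags
  exact main_invariant flags [] 0 0 (by simp [falseRunsMax]) (by simp [CurOK])
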